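-- pv_equiv track=rewrite | github.com/cuthbertLab/music21 | music21/musedata/__init__.py | _getDigitsFollowingTag
-- ===== SOURCE A (Python) =====
-- def _getDigitsFollowingTag(line, tag):
--     '''
--
--     >>> mdp = musedata.MuseDataPart()
--     >>> mdp._getDigitsFollowingTag('junk WK#:2345', 'WK#:')
--     '2345'
--     >>> mdp._getDigitsFollowingTag('junk WK#: 2345 junk', 'WK#:')
--     '2345'
--     >>> mdp._getDigitsFollowingTag('$ K:-3   Q:4   T:3/4   C:22', 'Q:')
--     '4'
--     >>> mdp._getDigitsFollowingTag('$ K:-3   Q:4   T:3/4   C:22', 'T:')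
--     '3/4'
--     >>> mdp._getDigitsFollowingTag('$ K:-3   Q:4', 'T:')
--     ''
--     '''
--     post = []
--     if tag in line:
--         i = line.find(tag) + len(tag)
--         while i < len(line):
--             if line[i].isdigit():
--                 post.append(line[i])
--             elif line[i].isspace():
--                 pass
--             elif line[i] in '-/':  # chars to permit
--                 post.append(line[i])
--             else:  # anything other than space ends gather
--                 break
--             i += 1
--     return ''.join(post)
-- ===== SOURCE B (Python) =====
-- def _getDigitsFollowingTag(line, tag):
--     # two-pass: drop whitespace everywhere after the tag, then take the allowed prefix
--     i = line.find(tag)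
--     if i < 0:
--         return ''
--     filtered = ''.join(c for c in line[i + len(tag):] if not c.isspace())
--     out = ''
--     for c in filtered:
--         if c.isdigit() or c in '-/':
--             out += c
--         else:
--             break
--     return out
-- ===== Notes on version B (the rewrite author's own statement) =====
-- stated objective: simpler
-- what changed: Replaces the single index-driven scan with branch order digit/space/allowed/break by a two-pass decomposition: filter out all whitespace after the tag, then take the leading run of digit//- characters.
import Mathlib
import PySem

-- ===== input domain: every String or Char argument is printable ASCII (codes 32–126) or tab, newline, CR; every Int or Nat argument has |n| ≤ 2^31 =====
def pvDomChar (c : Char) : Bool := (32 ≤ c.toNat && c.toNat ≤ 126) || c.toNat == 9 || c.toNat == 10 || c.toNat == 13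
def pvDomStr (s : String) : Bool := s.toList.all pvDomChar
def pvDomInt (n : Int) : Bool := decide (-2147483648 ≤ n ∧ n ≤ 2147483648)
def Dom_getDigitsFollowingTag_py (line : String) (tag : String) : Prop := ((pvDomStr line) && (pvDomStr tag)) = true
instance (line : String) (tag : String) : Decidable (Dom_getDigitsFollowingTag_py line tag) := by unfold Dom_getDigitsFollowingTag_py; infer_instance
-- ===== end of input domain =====

-- B changes the decomposition only: A's one index-driven scan (digit/space/allowed/break
-- branches) becomes filter-out-whitespace then take-the-allowed-prefix; return values agree.

-- ===== PORT A =====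
-- A's while loop over indices i, i+1, … ported as structural recursion over the suffix
-- line[i:]; the accumulator `post` is the list being built.
def aGather : List Char → List Char
  | [] => []
  | c :: rest =>
    if PySem.Chars.isdigit c then c :: aGather rest
    else if PySem.Chars.isspace c then aGather rest
    else if c == '-' || c == '/' then c :: aGather rest
    else []

def getDigitsFollowingTag_py (line : String) (tag : String) : String :=
  let l := line.toList
  let t := tag.toList
  if PySem.Chars.isIn t l then
    String.ofList (aGather (l.drop ((PySem.Chars.find l t).toNat + t.length)))
  else
    String.ofList []

-- ===== PORT B =====
def bAllowed (c : Char) : Bool := PySem.Chars.isdigit c || c == '-' || c == '/'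

-- Source B's prefix loop with break
def bPrefix : List Char → List Char
  | [] => []
  | c :: rest => if bAllowed c then c :: bPrefix rest else []

def getDigitsFollowingTag_py_alt (line : String) (tag : String) : String :=
  let l := line.toList
  let t := tag.toList
  let i := PySem.Chars.find l t
  if i < 0 then String.ofList []
  else
    let filtered := (l.drop (i.toNat + t.length)).filter (fun c => !PySem.Chars.isspace c)
    String.ofList (bPrefix filtered)

-- ===== PRECONDITION & SPEC =====
def Spec_getDigitsFollowingTag_py (line : String) (tag : String) (out : String) : Prop := out = getDigitsFollowingTag_py_alt line tag
instance (line : String) (tag : String) (out : String) : Decidable (Spec_getDigitsFollowingTag_py line tag out) := by unfold Spec_getDigitsFollowingTag_py; infer_instance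

-- ===== CLAIM (what is proved, stated in full; the proofs are below) =====
def Claim_equal_getDigitsFollowingTag_py : Prop := ∀ (line : String) (tag : String), Dom_getDigitsFollowingTag_py line tag → Spec_getDigitsFollowingTag_py line tag (getDigitsFollowingTag_py line tag)

-- ===== LEMMAS AND PROOFS =====

theorem isspace_of_isdigit (c : Char) (h : PySem.Chars.isdigit c = true) :
    PySem.Chars.isspace c = false := by
  simp [PySem.Chars.isdigit, Char.le_def, UInt32.le_iff_toNat_le] at h
  simp [PySem.Chars.isspace]
  omega

theorem aGather_eq_bPrefix_filter (cs : List Char) :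
    aGather cs = bPrefix (cs.filter (fun c => !PySem.Chars.isspace c)) := by
  induction cs with
  | nil => rfl
  | cons c rest ih =>
    by_cases hd : PySem.Chars.isdigit c = true
    · have hs := isspace_of_isdigit c hd
      simp [aGather, hd, bPrefix, bAllowed, hs, ih]
    · by_cases hs : PySem.Chars.isspace c = true
      · simp [aGather, hd, hs, ih]
      · by_cases hm : (c == '-' || c == '/') = true
        · simp [aGather, hd, hs, hm, bPrefix, bAllowed, ih]
        · simp [aGather, hd, hs, hm, bPrefix, bAllowed]

-- ===== VERDICT (by name: the statement is the Claim_ definition above) =====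
theorem getDigitsFollowingTag_py_spec : Claim_equal_getDigitsFollowingTag_py := by
  intro line tag _
  unfold Spec_getDigitsFollowingTag_py getDigitsFollowingTag_py getDigitsFollowingTag_py_alt
  by_cases h : PySem.Chars.isIn tag.toList line.toList = true
  · have hf : 0 ≤ PySem.Chars.find line.toList tag.toList :=
      (PySem.Chars.find_nonneg_iff _ _).mpr ((PySem.Chars.isIn_iff_infix _ _).mp h)
    simp only [h, if_true]
    rw [if_neg (by omega)]
    rw [aGather_eq_bPrefix_filter]
  · have hf : PySem.Chars.find line.toList tag.toList = -1 :=
      (PySem.Chars.find_eq_neg_one_iff _ _).mpr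
        (fun hinf => h ((PySem.Chars.isIn_iff_infix _ _).mpr hinf))
    simp only [h, hf]
    norm_num
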